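-- pv_equiv track=rewrite | github.com/ehsan-255/master-knowledge-base | tools/scribe/error_handling/llm_error_handler.py | _group_violations_by_type
-- ===== SOURCE A (Python) =====
-- from typing import Dict, List, Any, Optional, Tuple, Union
--
-- def _group_violations_by_type(violations: List[Dict[str, Any]]) -> Dict[str, List[Dict[str, Any]]]:
--     """Group SHACL violations by type for organized handling."""
--     grouped = {}
--
--     for violation in violations:
--         violation_type = violation.get('type', 'unknown')
--
--         # Map violation types to categories
--         if violation_type == 'missing_required_field':
--             category = 'missing_required'
--         elif violation_type == 'forbidden_field_present':
--             category = 'forbidden_field'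
--         elif 'pattern' in violation_type.lower():
--             category = 'pattern_violation'
--         elif 'datatype' in violation_type.lower():
--             category = 'datatype_violation'
--         else:
--             category = 'other'
--
--         if category not in grouped:
--             grouped[category] = []
--         grouped[category].append(violation)
--
--     return grouped
-- ===== SOURCE B (Python) =====
-- def _category(violation):
--     t = violation.get('type', 'unknown')
--     if t == 'missing_required_field':
--         return 'missing_required'
--     if t == 'forbidden_field_present':
--         return 'forbidden_field'
--     tl = t.lower()
--     if 'pattern' in tl:
--         return 'pattern_violation'
--     if 'datatype' in tl:
--         return 'datatype_violation'
--     return 'other'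
--
--
-- def _group_violations_by_type(violations):
--     cats = [_category(v) for v in violations]
--     order = list(dict.fromkeys(cats))
--     return {c: [v for v, cv in zip(violations, cats) if cv == c] for c in order}
-- ===== Notes on version B (the rewrite author's own statement) =====
-- stated objective: alternative
-- what changed: Replaces A's single-pass mutable-dict accumulation with a declarative group-by: map each violation to its category, dedup the category list for first-occurrence key order, then build each group by filtering the zipped (violation, category) list.
import Mathlib
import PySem

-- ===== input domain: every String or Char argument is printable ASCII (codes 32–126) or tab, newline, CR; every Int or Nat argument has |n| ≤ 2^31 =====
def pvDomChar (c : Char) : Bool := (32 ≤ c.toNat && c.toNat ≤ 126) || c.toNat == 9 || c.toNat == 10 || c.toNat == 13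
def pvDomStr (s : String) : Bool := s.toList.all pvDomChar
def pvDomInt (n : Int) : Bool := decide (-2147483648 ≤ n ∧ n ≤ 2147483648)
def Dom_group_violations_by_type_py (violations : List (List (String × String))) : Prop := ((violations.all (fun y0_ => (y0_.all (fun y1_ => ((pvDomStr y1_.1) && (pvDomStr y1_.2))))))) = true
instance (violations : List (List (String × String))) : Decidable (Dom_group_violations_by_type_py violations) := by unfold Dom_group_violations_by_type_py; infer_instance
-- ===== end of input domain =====

-- B groups by a declarative pipeline (map categories, dedup for key order, filter per category)
-- instead of A's single-pass mutable-dict accumulation; same result, same cost class (alternative).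

-- ===== PORT A =====
-- literal transliteration of A's loop: a dict accumulator, the ordered branch chain inline,
-- 'if category not in grouped: grouped[category] = []' then append.
def group_violations_by_type_py (violations : List (List (String × String))) : List (String × List (List (String × String))) :=
  (violations.foldl (fun grouped violation =>
      let violation_type := (PySem.Dict.mk violation).getD "type" "unknown"
      let category :=
        if violation_type == "missing_required_field" then "missing_required"
        else if violation_type == "forbidden_field_present" then "forbidden_field"
        else if PySem.Str.isIn "pattern" (PySem.Str.lower violation_type) then "pattern_violation"
        else if PySem.Str.isIn "datatype" (PySem.Str.lower violation_type) then "datatype_violation"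
        else "other"
      let grouped := if grouped.contains category then grouped else grouped.insert category ([] : List (List (String × String)))
      grouped.modify category [] (fun l => l ++ [violation]))
    PySem.Dict.empty).items

-- ===== PORT B =====
-- helper _category of Source B
def pvCategory (violation : List (String × String)) : String :=
  let t := (PySem.Dict.mk violation).getD "type" "unknown"
  if t == "missing_required_field" then "missing_required"
  else if t == "forbidden_field_present" then "forbidden_field"
  else
    let tl := PySem.Str.lower t
    if PySem.Str.isIn "pattern" tl then "pattern_violation"
    else if PySem.Str.isIn "datatype" tl then "datatype_violation"
    else "other"

def group_violations_by_type_py_alt (violations : List (List (String × String))) : List (String × List (List (String × String))) :=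
  let cats := violations.map pvCategory
  let order := PySem.List.dedup cats
  order.map (fun c => (c, ((violations.zip cats).filter (fun p => p.2 == c)).map (·.1)))

-- ===== PRECONDITION & SPEC =====
def Spec_group_violations_by_type_py (violations : List (List (String × String))) (out : List (String × List (List (String × String)))) : Prop := out = group_violations_by_type_py_alt violations
instance (violations : List (List (String × String))) (out : List (String × List (List (String × String)))) : Decidable (Spec_group_violations_by_type_py violations out) := by unfold Spec_group_violations_by_type_py; infer_instance

-- ===== CLAIM (what is proved, stated in full; the proofs are below) =====
def Claim_equal_group_violations_by_type_py : Prop := ∀ (violations : List (List (String × String))), Dom_group_violations_by_type_py violations → Spec_group_violations_by_type_py violations (group_violations_by_type_py violations)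

-- ===== LEMMAS AND PROOFS =====

theorem pvZipMap {α β : Type} (l : List α) (f : α → β) :
    l.zip (l.map f) = l.map (fun v => (v, f v)) := by
  induction l with
  | nil => rfl
  | cons v t ih => simp [ih]

-- A's loop body ('if absent, install []; then append') is one Python dict-modify step at the category key.
theorem pvStep_eq (d : PySem.Dict String (List (List (String × String)))) (v : List (String × String)) :
    (let grouped := if d.contains (pvCategory v) then d else d.insert (pvCategory v) []
     grouped.modify (pvCategory v) [] (fun l => l ++ [v]))
    = d.modify (pvCategory v) [] (fun l => l ++ [v]) := by
  by_cases h : d.contains (pvCategory v)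
  · simp [h]
  · simp [h, PySem.Dict.modify, PySem.Dict.getD_insert_self, PySem.Dict.insert_insert_self,
      PySem.Dict.getD_of_not_contains d ([] : List (List (String × String))) (by simpa using h)]

-- ===== VERDICT (by name: the statement is the Claim_ definition above) =====

theorem group_violations_by_type_py_spec : Claim_equal_group_violations_by_type_py := by
  intro violations _
  unfold Spec_group_violations_by_type_py group_violations_by_type_py group_violations_by_type_py_alt
  -- the inline branch chain of A's loop body is exactly pvCategory, and the body is one modify step
  have hbody : (violations.foldl (fun grouped violation =>
      let violation_type := (PySem.Dict.mk violation).getD "type" "unknown"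
      let category :=
        if violation_type == "missing_required_field" then "missing_required"
        else if violation_type == "forbidden_field_present" then "forbidden_field"
        else if PySem.Str.isIn "pattern" (PySem.Str.lower violation_type) then "pattern_violation"
        else if PySem.Str.isIn "datatype" (PySem.Str.lower violation_type) then "datatype_violation"
        else "other"
      let grouped := if grouped.contains category then grouped else grouped.insert category ([] : List (List (String × String)))
      grouped.modify category [] (fun l => l ++ [violation]))
    PySem.Dict.empty)
    = violations.foldl (fun d v => d.modify (pvCategory v) [] (fun l => l ++ [v])) PySem.Dict.empty := by
    have hfun : (fun (grouped : PySem.Dict String (List (List (String × String)))) violation =>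
        let violation_type := (PySem.Dict.mk violation).getD "type" "unknown"
        let category :=
          if violation_type == "missing_required_field" then "missing_required"
          else if violation_type == "forbidden_field_present" then "forbidden_field"
          else if PySem.Str.isIn "pattern" (PySem.Str.lower violation_type) then "pattern_violation"
          else if PySem.Str.isIn "datatype" (PySem.Str.lower violation_type) then "datatype_violation"
          else "other"
        let grouped := if grouped.contains category then grouped else grouped.insert category ([] : List (List (String × String)))
        grouped.modify category [] (fun l => l ++ [violation]))
        = (fun d v => d.modify (pvCategory v) [] (fun l => l ++ [v])) := by
      funext d v
      exact pvStep_eq d v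
    rw [hfun]
  rw [hbody]
  -- characterise the final dict: keys and per-key contents
  have hnd : (violations.foldl (fun d v => d.modify (pvCategory v) [] (fun l => l ++ [v])) PySem.Dict.empty).keys.Nodup := by
    exact PySem.Dict.nodup_keys_foldl_modify_key violations pvCategory [] (fun d v l => l ++ [v]) PySem.Dict.empty (by simp)
  rw [PySem.Dict.items_eq_map_keys _ hnd ([] : List (List (String × String)))]
  have hkeys : (violations.foldl (fun d v => d.modify (pvCategory v) [] (fun l => l ++ [v])) PySem.Dict.empty).keys
      = PySem.List.dedup (violations.map pvCategory) := by
    rw [PySem.Dict.keys_foldl_modify_key violations pvCategory [] (fun d v l => l ++ [v]) PySem.Dict.empty]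
    simp [PySem.Dict.keys_empty, PySem.List.dedup_eq_ofList, PySem.Set.ofList_eq_foldl, PySem.Set.update]
  rw [hkeys]
  apply List.map_congr_left
  intro c _
  have hpairs : violations.foldl (fun d v => d.modify (pvCategory v) [] (fun l => l ++ [v])) PySem.Dict.empty
      = (violations.map (fun v => (pvCategory v, v))).foldl (fun d p => d.modify p.1 [] (fun l => l ++ [p.2])) PySem.Dict.empty := by
    rw [List.foldl_map]
  rw [hpairs, PySem.Dict.getD_foldl_modify_append]
  rw [pvZipMap violations pvCategory]
  simp [List.filter_map, List.map_map, Function.comp_def]
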